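-- pv_equiv track=rewrite | github.com/YuriiLaba/PageRank | pageRank.py | create_graph_out_bound
-- ===== SOURCE A (Python) =====
-- def create_graph_out_bound(data):
--     """
--     This function create graph where node and all nodes to which it refers are presented
--     :param data: data to create graph
--     :return out bound graph
--     """
--     out_bound = {}
--     for file_index in range(len(data)):
--         fromNodeID = data[file_index].split()[0]
--         toNodeID = data[file_index].split()[1]
--
--         if fromNodeID in out_bound:
--             out_bound[fromNodeID].append(toNodeID)
--         else:
--             out_bound[fromNodeID] = [toNodeID]
--     return out_bound
-- ===== SOURCE B (Python) =====
-- def create_graph_out_bound(data):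
--     """
--     This function create graph where node and all nodes to which it refers are presented
--     :param data: data to create graph
--     :return out bound graph
--     """
--     pairs = [(tok[0], tok[1]) for tok in (line.split() for line in data)]
--     keys = dict.fromkeys(f for f, _ in pairs)
--     return {k: [t for f, t in pairs if f == k] for k in keys}
-- ===== Notes on version B (the rewrite author's own statement) =====
-- stated objective: alternative
-- what changed: A builds the dict incrementally, appending to a mutable list per key inside one loop; B splits all lines once into (from,to) pairs, dedups the source keys in first-occurrence order, and builds the result by a per-key gather comprehension over the pair list.
import Mathlib
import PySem

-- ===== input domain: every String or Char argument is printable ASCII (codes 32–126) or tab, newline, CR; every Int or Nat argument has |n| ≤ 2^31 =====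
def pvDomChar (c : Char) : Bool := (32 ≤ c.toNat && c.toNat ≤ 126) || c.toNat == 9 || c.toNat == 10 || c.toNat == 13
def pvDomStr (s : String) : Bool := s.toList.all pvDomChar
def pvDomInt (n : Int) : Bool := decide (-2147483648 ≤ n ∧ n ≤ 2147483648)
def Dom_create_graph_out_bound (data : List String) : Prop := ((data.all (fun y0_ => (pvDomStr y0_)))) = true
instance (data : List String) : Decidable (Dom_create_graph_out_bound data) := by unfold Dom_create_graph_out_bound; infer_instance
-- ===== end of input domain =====

-- B replaces A's one-pass mutable-dict accumulation by split-once / dedup-keys / per-key gather; objective: alternative decomposition.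

-- ===== PORT A =====
-- literal transliteration of A: index loop over range(len(data)), split each line twice,
-- append to the existing dict entry or insert a fresh singleton list; return the dict (its items).
def create_graph_out_bound (data : List String) : List (String × List String) :=
  ((PySem.List.pyRange 0 (PySem.List.len data) 1).foldl
    (fun (out_bound : PySem.Dict String (List String)) file_index =>
      let fromNodeID := PySem.List.pyGetD (PySem.Str.split₀ (PySem.List.pyGetD data file_index "")) 0 ""
      let toNodeID := PySem.List.pyGetD (PySem.Str.split₀ (PySem.List.pyGetD data file_index "")) 1 ""
      if out_bound.contains fromNodeID then
        out_bound.modify fromNodeID [] (fun l => l ++ [toNodeID])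
      else
        out_bound.insert fromNodeID [toNodeID])
    PySem.Dict.empty).items

-- ===== PORT B =====
-- literal transliteration of B: split all lines once into (from, to) pairs,
-- dedup the source keys in first-occurrence order, gather each key's targets.
def create_graph_out_bound_alt (data : List String) : List (String × List String) :=
  let pairs := data.map (fun line =>
    (PySem.List.pyGetD (PySem.Str.split₀ line) 0 "",
     PySem.List.pyGetD (PySem.Str.split₀ line) 1 ""))
  let keys := PySem.List.dedup (pairs.map (·.1))
  keys.map (fun k => (k, (pairs.filter (fun p => p.1 == k)).map (·.2)))

-- ===== PRECONDITION & SPEC =====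
-- Pre_ excludes exactly the lines with fewer than two whitespace tokens, on which A raises IndexError.
def Pre_create_graph_out_bound (data : List String) : Prop :=
  ∀ s ∈ data, 2 ≤ (PySem.Str.split₀ s).length
instance (data : List String) : Decidable (Pre_create_graph_out_bound data) := by unfold Pre_create_graph_out_bound; infer_instance
def pvWitness_create_graph_out_bound : List String := (["1 2", "1 3", "2 1"])

def Spec_create_graph_out_bound (data : List String) (out : List (String × List String)) : Prop := out = create_graph_out_bound_alt data
instance (data : List String) (out : List (String × List String)) : Decidable (Spec_create_graph_out_bound data out) := by unfold Spec_create_graph_out_bound; infer_instance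

-- ===== CLAIM (what is proved, stated in full; the proofs are below) =====
def Claim_equal_create_graph_out_bound : Prop := ∀ (data : List String), Dom_create_graph_out_bound data → Pre_create_graph_out_bound data → Spec_create_graph_out_bound data (create_graph_out_bound data)

-- ===== LEMMAS AND PROOFS =====

-- the (from, to) pair a line contributes
def pvPair (line : String) : String × String :=
  (PySem.List.pyGetD (PySem.Str.split₀ line) 0 "",
   PySem.List.pyGetD (PySem.Str.split₀ line) 1 "")

-- A's branch (append-or-insert) is exactly an unconditional `modify`
theorem pv_step_eq (d : PySem.Dict String (List String)) (f t : String) :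
    (if d.contains f then d.modify f [] (fun l => l ++ [t]) else d.insert f [t])
      = d.modify f [] (fun l => l ++ [t]) := by
  by_cases h : d.contains f = true
  · simp [h]
  · simp only [Bool.not_eq_true] at h
    simp [h, PySem.Dict.modify, PySem.Dict.getD_of_not_contains (h := h)]

-- A's dict as a fold of `modify` over the pair list
theorem pv_fold_eq (data : List String) :
    create_graph_out_bound data =
      ((data.map pvPair).foldl
        (fun (d : PySem.Dict String (List String)) p => d.modify p.1 [] (fun l => l ++ [p.2]))
        PySem.Dict.empty).items := by
  unfold create_graph_out_bound
  rw [PySem.List.foldl_pyRange_zero_pyGetD data ""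
    (fun (out_bound : PySem.Dict String (List String)) line =>
      if out_bound.contains (PySem.List.pyGetD (PySem.Str.split₀ line) 0 "") then
        out_bound.modify (PySem.List.pyGetD (PySem.Str.split₀ line) 0 "")
          [] (fun l => l ++ [PySem.List.pyGetD (PySem.Str.split₀ line) 1 ""])
      else
        out_bound.insert (PySem.List.pyGetD (PySem.Str.split₀ line) 0 "")
          [PySem.List.pyGetD (PySem.Str.split₀ line) 1 ""]) PySem.Dict.empty]
  rw [List.foldl_map]
  congr 1
  apply List.foldl_ext
  intro d line _
  simp only [pvPair]
  exact pv_step_eq d _ _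

-- ===== VERDICT (by name: the statement is the Claim_ definition above) =====
theorem create_graph_out_bound_spec : Claim_equal_create_graph_out_bound := by
  intro data _ _
  unfold Spec_create_graph_out_bound create_graph_out_bound_alt
  rw [pv_fold_eq]
  set pairs := data.map pvPair with hpairs
  have hnd : ((pairs.foldl
      (fun (d : PySem.Dict String (List String)) p => d.modify p.1 [] (fun l => l ++ [p.2]))
      PySem.Dict.empty)).keys.Nodup := by
    exact PySem.Dict.nodup_keys_foldl_modify_key pairs Prod.fst [] (fun _ p => (· ++ [p.2]))
      PySem.Dict.empty (by simp [pysem])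
  rw [PySem.Dict.items_eq_map_keys _ hnd []]
  have hkeys : ((pairs.foldl
      (fun (d : PySem.Dict String (List String)) p => d.modify p.1 [] (fun l => l ++ [p.2]))
      PySem.Dict.empty)).keys = PySem.List.dedup (pairs.map (·.1)) := by
    rw [PySem.Dict.keys_foldl_modify_key]
    simp [pysem, PySem.Set.ofList, List.foldl_map]
  rw [hkeys]
  refine List.map_congr_left (fun k _ => ?_)
  rw [PySem.Dict.getD_foldl_modify_append]
  rw [hpairs]
  unfold pvPair
  simp
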